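-- pv_equiv track=rewrite | github.com/Vergil0327/leetcode-history | 2-D Dynamic Programming/DigitDP/3869. Count Fancy Numbers in a Range/solution.py | countFancy
-- ===== SOURCE A (Python) =====
-- from functools import cache
--
-- good_sums = [False] * 151 # 9 * 15 + 1
--
-- def countFancy(l: int, r: int) -> int:
--
--     def solve(N_str):
--         n = len(N_str)
--
--         @cache
--         def dp(i, is_less, is_started, prev_digit, monotone_type, current_sum):
--             # monotone_type: 0: unknown, 1: strictly increasing, 2: strictly decreasing, 3: broken
--             if i >= n:
--                 # Fancy if (started and good) OR (started and digit sum is good)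
--                 is_monotone = is_started and monotone_type in [1, 2]
--
--                 # sum_is_good = is_started and is_good(current_sum)
--                 # return 1 if (is_monotone or sum_is_good) else 0
--
--                 return 1 if (is_monotone or good_sums[current_sum]) else 0
--
--             limit = int(N_str[i]) if not is_less else 9
--             res = 0
--
--             for d in range(limit + 1):
--                 next_is_less = is_less or (d < limit)
--
--                 if not is_started:
--                     if d == 0:
--                         # Still haven't started
--                         res += dp(i + 1, next_is_less, False, -1, 0, 0)
--                     else:
--                         # Starting the number with digit 'd'
--                         # Every single-digit start is potentially inc or dec
--                         # We'll treat a single digit as BOTH (type 1 and 2)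
--                         # To simplify, start as "type 0" and decide on second digit
--                         res += dp(i + 1, next_is_less, True, d, 0, d)
--                 else:
--                     new_sum = current_sum + d
--                     new_type = monotone_type
--
--                     if monotone_type == 0: # Second digit decision
--                         if d > prev_digit: new_type = 1
--                         elif d < prev_digit: new_type = 2
--                         else: new_type = 3 # Equal digits break monotonicity
--                     elif monotone_type == 1: # Must keep increasing
--                         if d <= prev_digit: new_type = 3
--                     elif monotone_type == 2: # Must keep decreasing
--                         if d >= prev_digit: new_type = 3
--
--                     res += dp(i + 1, next_is_less, True, d, new_type, new_sum)
--
--             return res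
--
--         return dp(0, False, False, -1, 0, 0)
--
--     # Clear cache between calls to avoid interference
--     ans_r = solve(str(r))
--     ans_l = solve(str(l - 1))
--     return ans_r - ans_l
-- ===== SOURCE B (Python) =====
-- from math import comb
--
-- def _count(N):
--     # fancy numbers in [0, N]: >= 2 digits, strictly increasing or strictly decreasing
--     ds = [int(c) for c in str(N)]
--     n = len(ds)
--     total = 0
--     for k in range(2, n):                      # all lengths shorter than n
--         total += comb(9, k) + comb(10, k)
--     if n >= 2:
--         for d in range(1, ds[0]):              # smaller first digit, rest free
--             total += comb(9 - d, n - 1) + comb(d, n - 1)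
--         prev, mtype, broke = ds[0], 0, False   # tight walk; mtype 0 undecided, 1 inc, 2 dec
--         for i in range(1, n):
--             m = n - 1 - i                      # free positions after i
--             if mtype != 2:
--                 for d in range(prev + 1, ds[i]):
--                     total += comb(9 - d, m)
--             if mtype != 1:
--                 for d in range(0, min(ds[i], prev)):
--                     total += comb(d, m)
--             t = ds[i]
--             if mtype == 0:
--                 mtype = 1 if t > prev else (2 if t < prev else 3)
--             elif mtype == 1 and t <= prev:
--                 mtype = 3
--             elif mtype == 2 and t >= prev:
--                 mtype = 3
--             if mtype == 3:
--                 broke = True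
--                 break
--             prev = t
--         if not broke and mtype in (1, 2):      # N itself is fancy
--             total += 1
--     return total
--
-- def countFancy(l: int, r: int) -> int:
--     return _count(r) - _count(l - 1)
-- ===== Notes on version B (the rewrite author's own statement) =====
-- stated objective: faster
-- what changed: Replaces the cached 6-argument digit-DP recursion (whose digit-sum path is dead: good_sums is all-False) by a direct combinatorial count: fancy numbers <= N are counted with binomial coefficients per length plus one tight left-to-right walk over N's digits, and countFancy returns count(r)-count(l-1).
import Mathlib
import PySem

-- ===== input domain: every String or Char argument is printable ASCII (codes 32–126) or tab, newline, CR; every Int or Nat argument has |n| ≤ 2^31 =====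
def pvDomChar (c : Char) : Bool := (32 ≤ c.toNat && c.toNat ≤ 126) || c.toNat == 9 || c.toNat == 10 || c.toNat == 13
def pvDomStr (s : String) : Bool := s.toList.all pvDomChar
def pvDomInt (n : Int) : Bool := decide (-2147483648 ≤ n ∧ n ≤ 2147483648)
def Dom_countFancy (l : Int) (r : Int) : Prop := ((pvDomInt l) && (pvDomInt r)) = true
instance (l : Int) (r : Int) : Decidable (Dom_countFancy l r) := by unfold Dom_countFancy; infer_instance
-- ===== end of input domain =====

-- ===== PORT A =====
-- Header: B replaces A's cached digit-DP (dead digit-sum path: good_sums is all-False) by a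
-- combinatorial binomial count per digit position; equivalence is proved on Pre_ (l ≥ 1, r ≥ 0),
-- exactly where the Pythons return (both raise ValueError parsing str of a negative bound).

def goodSums : List Bool := List.replicate 151 false

-- int(c) for one char of str(N), N ≥ 0: always a digit char there, so getD 0 is never taken
def chInt (c : Char) : Int := (PySem.Int.ofChars? [c]).getD 0

-- @cache of the Python dp: a hash table keyed by the argument tuple, threaded through the calls.
-- `rest` is the suffix N_str[i:], so the `i >= n` test becomes `rest = []`.
-- good_sums[current_sum] : index is 0..90 ≤ 150 on Dom, so pyGetD never takes its default.
def dpGo : List Char → Int → Bool → Bool → Int → Int → Int →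
    Std.HashMap (Int × Bool × Bool × Int × Int × Int) Int →
    Int × Std.HashMap (Int × Bool × Bool × Int × Int × Int) Int
  | rest, i, isl, ist, prev, mt, cs, memo =>
    match memo[(i, isl, ist, prev, mt, cs)]? with
    | some v => (v, memo)
    | none =>
      let p :=
        match rest with
        | [] =>
            ((if (ist && (mt == 1 || mt == 2)) || PySem.List.pyGetD goodSums cs false then (1 : Int) else 0), memo)
        | c :: rest' =>
            let limit : Int := if !isl then chInt c else 9
            (PySem.List.pyRange 0 (limit + 1) 1).foldl
              (fun acc d =>
                let nl := isl || decide (d < limit)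
                let q :=
                  if !ist then
                    if d == 0 then dpGo rest' (i + 1) nl false (-1) 0 0 acc.2
                    else dpGo rest' (i + 1) nl true d 0 d acc.2
                  else
                    let ns := cs + d
                    let nt : Int :=
                      if mt == 0 then (if prev < d then 1 else if d < prev then 2 else 3)
                      else if mt == 1 then (if d ≤ prev then 3 else mt)
                      else if mt == 2 then (if prev ≤ d then 3 else mt)
                      else mt
                    dpGo rest' (i + 1) nl true d nt ns acc.2
                (acc.1 + q.1, q.2))
              ((0 : Int), memo)
      (p.1, p.2.insert (i, isl, ist, prev, mt, cs) p.1)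

def solveA (nstr : String) : Int :=
  (dpGo nstr.toList 0 false false (-1) 0 0 ∅).1

def countFancy (l : Int) (r : Int) : Int :=
  let ansR := solveA (PySem.Int.toStr r)
  let ansL := solveA (PySem.Int.toStr (l - 1))
  ansR - ansL

-- ===== PORT B =====
-- math.comb(n, k); every use below has n, k ≥ 0
def combI (n k : Int) : Int := (Nat.choose n.toNat k.toNat : Int)

-- the tight walk `for i in range(1, n)` of Source B over the remaining digits, with its break/else
def bTight : List Int → Int → Int → Int → Int
  | [], _prev, mtype, total => if mtype == 1 || mtype == 2 then total + 1 else total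
  | t :: ts', prev, mtype, total =>
    let m : Int := (ts'.length : Int)
    let total1 := if mtype != 2 then
        total + ((PySem.List.pyRange (prev + 1) t 1).map (fun d => combI (9 - d) m)).sum
      else total
    let total2 := if mtype != 1 then
        total1 + ((PySem.List.pyRange 0 (min t prev) 1).map (fun d => combI d m)).sum
      else total1
    let nt : Int :=
      if mtype == 0 then (if prev < t then 1 else if t < prev then 2 else 3)
      else if mtype == 1 && t ≤ prev then 3
      else if mtype == 2 && prev ≤ t then 3
      else mtype
    if nt == 3 then total2 else bTight ts' t nt total2

def countB (N : Int) : Int :=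
  let ds := (PySem.Int.toStr N).toList.map chInt  -- int(c), the same one-char int() helper as A's side
  let n : Int := (ds.length : Int)
  let total := ((PySem.List.pyRange 2 n 1).map (fun k => combI 9 k + combI 10 k)).sum
  if 2 ≤ n then
    let d0 := ds.headI   -- ds[0]; str(N) is never empty
    let total1 := total + ((PySem.List.pyRange 1 d0 1).map (fun d => combI (9 - d) (n - 1) + combI d (n - 1))).sum
    bTight ds.tail d0 0 total1
  else total

def countFancy_alt (l : Int) (r : Int) : Int := countB r - countB (l - 1)

-- ===== PRECONDITION & SPEC =====
-- Pre_ excludes exactly r < 0 and l < 1, where A raises ValueError (int('-') on the sign of str(r) / str(l-1))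
def Pre_countFancy (l : Int) (r : Int) : Prop := 1 ≤ l ∧ 0 ≤ r
instance (l : Int) (r : Int) : Decidable (Pre_countFancy l r) := by unfold Pre_countFancy; infer_instance
def pvWitness_countFancy : Int × Int := (1, 10)

def Spec_countFancy (l : Int) (r : Int) (out : Int) : Prop := out = countFancy_alt l r
instance (l : Int) (r : Int) (out : Int) : Decidable (Spec_countFancy l r out) := by unfold Spec_countFancy; infer_instance

-- ===== CLAIM (what is proved, stated in full; the proofs are below) =====
def Claim_equal_countFancy : Prop := ∀ (l : Int) (r : Int), Dom_countFancy l r → Pre_countFancy l r → Spec_countFancy l r (countFancy l r)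

-- ===== LEMMAS AND PROOFS =====

-- the same recursion as dpGo/dpLoop with the cache removed
def dpP : List Char → Bool → Bool → Int → Int → Int → Int
  | [], _isl, ist, _prev, mt, cs =>
      if (ist && (mt == 1 || mt == 2)) || PySem.List.pyGetD goodSums cs false then 1 else 0
  | c :: rest', isl, ist, prev, mt, cs =>
      let limit : Int := if !isl then chInt c else 9
      ((PySem.List.pyRange 0 (limit + 1) 1).map (fun d =>
        let nl := isl || decide (d < limit)
        if !ist then
          if d == 0 then dpP rest' nl false (-1) 0 0
          else dpP rest' nl true d 0 d
        else
          let nt : Int :=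
            if mt == 0 then (if prev < d then 1 else if d < prev then 2 else 3)
            else if mt == 1 then (if d ≤ prev then 3 else mt)
            else if mt == 2 then (if prev ≤ d then 3 else mt)
            else mt
          dpP rest' nl true d nt (cs + d))).sum

def MemoOK (s : List Char) (memo : Std.HashMap (Int × Bool × Bool × Int × Int × Int) Int) : Prop :=
  ∀ (i : Int) (isl ist : Bool) (prev mt cs v : Int), memo[(i, isl, ist, prev, mt, cs)]? = some v →
    v = dpP (s.drop i.toNat) isl ist prev mt cs

theorem MemoOK_insert (s : List Char)
    (memo : Std.HashMap (Int × Bool × Bool × Int × Int × Int) Int)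
    (i : Int) (isl ist : Bool) (prev mt cs v : Int) (hm : MemoOK s memo)
    (hv : v = dpP (s.drop i.toNat) isl ist prev mt cs) :
    MemoOK s (memo.insert (i, isl, ist, prev, mt, cs) v) := by
  intro i' isl' ist' prev' mt' cs' v' h
  rw [Std.HashMap.getElem?_insert] at h
  by_cases he : ((i, isl, ist, prev, mt, cs) == (i', isl', ist', prev', mt', cs')) = true
  · rw [if_pos he] at h
    cases h
    simp only [beq_iff_eq, Prod.mk.injEq] at he
    obtain ⟨e1, e2, e3, e4, e5, e6⟩ := he
    subst e1; subst e2; subst e3; subst e4; subst e5; subst e6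
    exact hv
  · rw [if_neg he] at h
    exact hm i' isl' ist' prev' mt' cs' v' h

theorem foldl_memo (s : List Char)
    (F : (Int × Std.HashMap (Int × Bool × Bool × Int × Int × Int) Int) → Int →
      (Int × Std.HashMap (Int × Bool × Bool × Int × Int × Int) Int))
    (G : Int → Int)
    (hF : ∀ acc d, MemoOK s acc.2 → (F acc d).1 = acc.1 + G d ∧ MemoOK s (F acc d).2) :
    ∀ (ds : List Int) acc, MemoOK s acc.2 →
      (ds.foldl F acc).1 = acc.1 + (ds.map G).sum ∧ MemoOK s (ds.foldl F acc).2 := by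
  intro ds
  induction ds with
  | nil =>
    intro acc hm
    simp only [List.foldl_nil, List.map_nil, List.sum_nil]
    exact ⟨by ring, hm⟩
  | cons d ds' ih =>
    intro acc hm
    rw [List.foldl_cons, List.map_cons, List.sum_cons]
    obtain ⟨h1, h2⟩ := hF acc d hm
    obtain ⟨h3, h4⟩ := ih (F acc d) h2
    refine ⟨?_, h4⟩
    rw [h3, h1]
    ring

theorem dpGo_spec (s : List Char) :
    ∀ (rest : List Char) (i : Int), 0 ≤ i → rest = s.drop i.toNat →
    ∀ (isl ist : Bool) (prev mt cs : Int) memo, MemoOK s memo →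
      (dpGo rest i isl ist prev mt cs memo).1 = dpP rest isl ist prev mt cs ∧
      MemoOK s (dpGo rest i isl ist prev mt cs memo).2 := by
  intro rest
  induction rest with
  | nil =>
    intro i hi hdrop isl ist prev mt cs memo hm
    rw [dpGo]
    cases hmk : memo[(i, isl, ist, prev, mt, cs)]? with
    | some v =>
      simp only
      have hv := hm i isl ist prev mt cs v hmk
      rw [← hdrop] at hv
      exact ⟨hv, hm⟩
    | none =>
      simp only
      refine ⟨rfl, ?_⟩
      apply MemoOK_insert s memo i isl ist prev mt cs _ hm
      rw [← hdrop]
      rfl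
  | cons c rest' ih =>
    intro i hi hdrop isl ist prev mt cs memo hm
    have hdrop' : rest' = s.drop (i + 1).toNat := by
      have h1 : (i + 1).toNat = i.toNat + 1 := by omega
      rw [h1, ← List.drop_drop, ← hdrop]
      rfl
    rw [dpGo]
    cases hmk : memo[(i, isl, ist, prev, mt, cs)]? with
    | some v =>
      simp only
      have hv := hm i isl ist prev mt cs v hmk
      rw [← hdrop] at hv
      exact ⟨hv, hm⟩
    | none =>
      simp only
      have hF : ∀ (acc : Int × Std.HashMap (Int × Bool × Bool × Int × Int × Int) Int)
          (d : Int), MemoOK s acc.2 →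
          (((fun acc d =>
            let nl := isl || decide (d < (if !isl then chInt c else 9))
            let q :=
              if !ist then
                if d == 0 then dpGo rest' (i + 1) nl false (-1) 0 0 acc.2
                else dpGo rest' (i + 1) nl true d 0 d acc.2
              else
                let ns := cs + d
                let nt : Int :=
                  if mt == 0 then (if prev < d then 1 else if d < prev then 2 else 3)
                  else if mt == 1 then (if d ≤ prev then 3 else mt)
                  else if mt == 2 then (if prev ≤ d then 3 else mt)
                  else mt
                dpGo rest' (i + 1) nl true d nt ns acc.2
            (acc.1 + q.1, q.2)) : (Int × Std.HashMap (Int × Bool × Bool × Int × Int × Int) Int) → Int →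
              (Int × Std.HashMap (Int × Bool × Bool × Int × Int × Int) Int)) acc d).1
            = acc.1 + ((fun d =>
              let nl := isl || decide (d < (if !isl then chInt c else 9))
              if !ist then
                if d == 0 then dpP rest' nl false (-1) 0 0
                else dpP rest' nl true d 0 d
              else
                let nt : Int :=
                  if mt == 0 then (if prev < d then 1 else if d < prev then 2 else 3)
                  else if mt == 1 then (if d ≤ prev then 3 else mt)
                  else if mt == 2 then (if prev ≤ d then 3 else mt)
                  else mt
                dpP rest' nl true d nt (cs + d)) : Int → Int) d ∧
            MemoOK s (((fun acc d =>
            let nl := isl || decide (d < (if !isl then chInt c else 9))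
            let q :=
              if !ist then
                if d == 0 then dpGo rest' (i + 1) nl false (-1) 0 0 acc.2
                else dpGo rest' (i + 1) nl true d 0 d acc.2
              else
                let ns := cs + d
                let nt : Int :=
                  if mt == 0 then (if prev < d then 1 else if d < prev then 2 else 3)
                  else if mt == 1 then (if d ≤ prev then 3 else mt)
                  else if mt == 2 then (if prev ≤ d then 3 else mt)
                  else mt
                dpGo rest' (i + 1) nl true d nt ns acc.2
            (acc.1 + q.1, q.2)) : (Int × Std.HashMap (Int × Bool × Bool × Int × Int × Int) Int) → Int →
              (Int × Std.HashMap (Int × Bool × Bool × Int × Int × Int) Int)) acc d).2 := by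
        intro acc d hm2
        cases ist with
        | false =>
          by_cases hd0 : d = 0
          · subst hd0
            obtain ⟨hq1, hq2⟩ := ih (i + 1) (by omega) hdrop'
              (isl || decide ((0:Int) < (if isl = false then chInt c else 9))) false (-1) 0 0 acc.2 hm2
            constructor
            · simp only [Bool.not_false, if_pos trivial, beq_self_eq_true]
              norm_num
              rw [hq1]
            · simp only [Bool.not_false, if_pos trivial, beq_self_eq_true]
              norm_num
              exact hq2
          · obtain ⟨hq1, hq2⟩ := ih (i + 1) (by omega) hdrop'
              (isl || decide (d < (if isl = false then chInt c else 9))) true d 0 d acc.2 hm2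
            constructor
            · norm_num [hd0]
              rw [hq1]
            · norm_num [hd0]
              exact hq2
        | true =>
          obtain ⟨hq1, hq2⟩ := ih (i + 1) (by omega) hdrop'
            (isl || decide (d < (if isl = false then chInt c else 9))) true d
            (if mt = 0 then (if prev < d then 1 else if d < prev then 2 else 3)
             else if mt = 1 then (if d ≤ prev then 3 else mt)
             else if mt = 2 then (if prev ≤ d then 3 else mt)
             else mt) (cs + d) acc.2 hm2
          constructor
          · norm_num
            rw [hq1]
          · norm_num
            exact hq2
      obtain ⟨h1, h2⟩ := foldl_memo s _ _ hF
        (PySem.List.pyRange 0 ((if !isl then chInt c else 9) + 1) 1) (0, memo) hm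
      have hval : ((PySem.List.pyRange 0 ((if !isl then chInt c else 9) + 1) 1).foldl
          (fun acc d =>
            let nl := isl || decide (d < (if !isl then chInt c else 9))
            let q :=
              if !ist then
                if d == 0 then dpGo rest' (i + 1) nl false (-1) 0 0 acc.2
                else dpGo rest' (i + 1) nl true d 0 d acc.2
              else
                let ns := cs + d
                let nt : Int :=
                  if mt == 0 then (if prev < d then 1 else if d < prev then 2 else 3)
                  else if mt == 1 then (if d ≤ prev then 3 else mt)
                  else if mt == 2 then (if prev ≤ d then 3 else mt)
                  else mt
                dpGo rest' (i + 1) nl true d nt ns acc.2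
            (acc.1 + q.1, q.2)) ((0 : Int), memo)).1
          = dpP (c :: rest') isl ist prev mt cs := by
        rw [h1, dpP]
        ring
      refine ⟨hval, ?_⟩
      apply MemoOK_insert s _ i isl ist prev mt cs _ h2
      rw [← hdrop]
      exact hval

theorem solveA_eq_dpP (nstr : String) :
    solveA nstr = dpP nstr.toList false false (-1) 0 0 := by
  have hm : MemoOK nstr.toList (∅ : Std.HashMap (Int × Bool × Bool × Int × Int × Int) Int) := by
    intro i isl ist prev mt cs v h
    simp at h
  exact (dpGo_spec nstr.toList nstr.toList 0 (by omega) (by simp) false false (-1) 0 0 ∅ hm).1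

-- good_sums is all-False, so the lookup never yields true
theorem goodFalse (cs : Int) : PySem.List.pyGetD goodSums cs false = false := by
  unfold PySem.List.pyGetD PySem.List.pyGet?
  cases PySem.List.pyIdx? (goodSums.length) cs with
  | none => simp
  | some k =>
    simp only [Option.bind_some, goodSums, List.getElem?_replicate]
    split_ifs <;> simp

-- Pascal-telescoped sums of binomials over digit ranges
theorem sumChooseHigh (L : Nat) : ∀ (n : Nat) (a : Int), a = 10 - (n : Int) → n ≤ 10 →
    ((PySem.List.pyRange a 10 1).map (fun d => combI (9 - d) (L : Int))).sum =
      combI (10 - a) ((L : Int) + 1) := by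
  intro n
  induction n with
  | zero =>
    intro a ha _
    subst ha
    norm_num [PySem.List.pyRange_one_eq_nil, combI]
  | succ n ih =>
    intro a ha hn
    rw [PySem.List.pyRange_one_cons (by omega)]
    simp only [List.map_cons, List.sum_cons]
    rw [show a + 1 = 10 - (n : Int) by push_cast at ha ⊢; omega]
    rw [ih (10 - (n : Int)) rfl (by omega)]
    simp only [combI]
    have e1 : ((9:Int) - a).toNat + 1 = ((10:Int) - a).toNat := by omega
    have e2 : (10 - (10 - (n : Int))).toNat = ((10:Int) - a).toNat - 1 := by omega
    have e3 : (((L:Nat) : Int) + 1).toNat = L + 1 := by omega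
    have e4 : (((L:Nat) : Int)).toNat = L := by omega
    rw [e2, e3, e4, ← e1, Nat.choose_succ_succ]
    push_cast
    ring
theorem sumChooseLow (L : Nat) : ∀ (n : Nat) (b : Int), b = (n : Int) → n ≤ 10 →
    ((PySem.List.pyRange 0 b 1).map (fun d => combI d (L : Int))).sum =
      combI b ((L : Int) + 1) := by
  intro n
  induction n with
  | zero =>
    intro b hb _
    subst hb
    norm_num [combI]
  | succ n ih =>
    intro b hb hn
    rw [hb]
    push_cast
    rw [PySem.List.pyRange_one_succ_right (by omega)]
    simp only [List.map_append, List.sum_append, List.map_cons, List.sum_cons, List.map_nil,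
      List.sum_nil]
    rw [ih (n : Int) rfl (by omega)]
    simp only [combI]
    have e1 : (((L:Nat) : Int) + 1).toNat = L + 1 := by omega
    have e2 : (((L:Nat) : Int)).toNat = L := by omega
    have e3 : ((n : Int) : Int).toNat = n := by omega
    have e4 : (((n : Int)) + 1).toNat = n + 1 := by omega
    rw [e1, e2, e3, e4, Nat.choose_succ_succ]
    push_cast
    ring

-- splitting sums over a digit range by comparison with prev
theorem splitSum0 (f g : Int → Int) (p : Int) (hp : 0 ≤ p) :
    ∀ (t : Int), 0 ≤ t →
      ((PySem.List.pyRange 0 t 1).map (fun d => if p < d then f d else if d < p then g d else 0)).sum =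
        ((PySem.List.pyRange (p + 1) t 1).map f).sum + ((PySem.List.pyRange 0 (min t p) 1).map g).sum := by
  intro t ht
  obtain ⟨n, rfl⟩ : ∃ n : Nat, t = (n : Int) := ⟨t.toNat, (Int.toNat_of_nonneg ht).symm⟩
  clear ht
  induction n with
  | zero =>
    rw [show min ((0:Nat) : Int) p = 0 by omega]
    simp [PySem.List.pyRange_one_eq_nil (by omega : (0:Int) ≤ p + 1)]
  | succ n ih =>
    push_cast
    rw [PySem.List.pyRange_one_succ_right (by exact_mod_cast Int.natCast_nonneg n)]
    rcases lt_trichotomy (n : Int) p with hc | hc | hc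
    · -- n < p : the new term goes to the g-sum
      rw [show min ((n:Int) + 1) p = (n:Int) + 1 by omega,
          show PySem.List.pyRange (p + 1) ((n:Int) + 1) 1 = [] from
            PySem.List.pyRange_one_eq_nil (by omega)]
      rw [show PySem.List.pyRange (p + 1) (n:Int) 1 = [] from
            PySem.List.pyRange_one_eq_nil (by omega),
          show min ((n:Int)) p = (n:Int) by omega] at ih
      rw [PySem.List.pyRange_one_succ_right (by exact_mod_cast Int.natCast_nonneg n)]
      simp only [List.map_append, List.sum_append, ih]
      simp [hc, not_lt.mpr (le_of_lt hc)]
    · -- n = p : the new term is 0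
      subst hc
      rw [show min ((n:Int) + 1) (n:Int) = (n:Int) by omega,
          show PySem.List.pyRange ((n:Int) + 1) ((n:Int) + 1) 1 = [] from
            PySem.List.pyRange_one_eq_nil (by omega)]
      rw [show PySem.List.pyRange ((n:Int) + 1) (n:Int) 1 = [] from
            PySem.List.pyRange_one_eq_nil (by omega),
          show min ((n:Int)) (n:Int) = (n:Int) by omega] at ih
      simp only [List.map_append, List.sum_append, ih]
      simp
    · -- p < n : the new term goes to the f-sum
      rw [show min ((n:Int) + 1) p = p by omega,
          PySem.List.pyRange_one_succ_right (by omega : p + 1 ≤ (n:Int))]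
      rw [show min ((n:Int)) p = p by omega] at ih
      simp only [List.map_append, List.sum_append, ih]
      simp [hc]
      omega

theorem splitSum1 (f : Int → Int) (p : Int) (hp : 0 ≤ p) :
    ∀ (t : Int), 0 ≤ t →
      ((PySem.List.pyRange 0 t 1).map (fun d => if d ≤ p then 0 else f d)).sum =
        ((PySem.List.pyRange (p + 1) t 1).map f).sum := by
  intro t ht
  obtain ⟨n, rfl⟩ : ∃ n : Nat, t = (n : Int) := ⟨t.toNat, (Int.toNat_of_nonneg ht).symm⟩
  clear ht
  induction n with
  | zero => simp [PySem.List.pyRange_one_eq_nil (by omega : (0:Int) ≤ p + 1)]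
  | succ n ih =>
    push_cast
    rw [PySem.List.pyRange_one_succ_right (by exact_mod_cast Int.natCast_nonneg n)]
    by_cases hc : (n : Int) ≤ p
    · rw [show PySem.List.pyRange (p + 1) ((n:Int) + 1) 1 = [] from
            PySem.List.pyRange_one_eq_nil (by omega)]
      rw [show PySem.List.pyRange (p + 1) (n:Int) 1 = [] from
            PySem.List.pyRange_one_eq_nil (by omega)] at ih
      simp only [List.map_append, List.sum_append, ih]
      simp [hc]
    · rw [PySem.List.pyRange_one_succ_right (by omega : p + 1 ≤ (n:Int))]
      simp only [List.map_append, List.sum_append, ih]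
      simp [hc]

theorem splitSum2 (g : Int → Int) (p : Int) (hp : 0 ≤ p) :
    ∀ (t : Int), 0 ≤ t →
      ((PySem.List.pyRange 0 t 1).map (fun d => if p ≤ d then 0 else g d)).sum =
        ((PySem.List.pyRange 0 (min t p) 1).map g).sum := by
  intro t ht
  obtain ⟨n, rfl⟩ : ∃ n : Nat, t = (n : Int) := ⟨t.toNat, (Int.toNat_of_nonneg ht).symm⟩
  clear ht
  induction n with
  | zero =>
    rw [show min ((0:Nat) : Int) p = 0 by omega]
    norm_num
  | succ n ih =>
    push_cast
    rw [PySem.List.pyRange_one_succ_right (by exact_mod_cast Int.natCast_nonneg n)]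
    by_cases hc : p ≤ (n : Int)
    · rw [show min ((n:Int) + 1) p = p by omega]
      rw [show min ((n:Int)) p = p by omega] at ih
      simp only [List.map_append, List.sum_append, ih]
      simp [hc]
    · rw [show min ((n:Int) + 1) p = (n:Int) + 1 by omega,
          PySem.List.pyRange_one_succ_right (by exact_mod_cast Int.natCast_nonneg n)]
      rw [show min ((n:Int)) p = (n:Int) by omega] at ih
      simp only [List.map_append, List.sum_append, ih]
      simp [hc]

-- a broken (monotone_type = 3) started state counts nothing
theorem dpP_mt3 (s : List Char) : ∀ (isl : Bool) (prev cs : Int),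
    dpP s isl true prev 3 cs = 0 := by
  induction s with
  | nil => intro isl prev cs; simp [dpP, goodFalse]
  | cons c s' ih =>
    intro isl prev cs
    rw [dpP]
    simp [ih]

-- free strictly-increasing completions: choose from the digits above prev
theorem dpP_inc (s : List Char) : ∀ (p cs : Int), 0 ≤ p → p ≤ 9 →
    dpP s true true p 1 cs = combI (9 - p) (s.length : Int) := by
  induction s with
  | nil => intro p cs h0 h9; simp [dpP, goodFalse, combI]
  | cons c s' ih =>
    intro p cs h0 h9
    rw [dpP]
    norm_num
    have hbody : ∀ d ∈ PySem.List.pyRange 0 10 1,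
        dpP s' true true d (if d ≤ p then 3 else 1) (cs + d)
          = (fun d => if d ≤ p then (0:Int) else combI (9 - d) (s'.length : Int)) d := by
      intro d hd
      rw [PySem.List.mem_pyRange_one] at hd
      by_cases hdp : d ≤ p
      · simp [hdp, dpP_mt3]
      · simp only [hdp, if_false]
        exact ih d (cs + d) (by omega) (by omega)
    rw [List.map_congr_left hbody, splitSum1 _ p h0 10 (by norm_num)]
    rw [sumChooseHigh s'.length (9 - p.toNat) (p + 1) (by omega) (by omega)]
    rw [show (10 : Int) - (p + 1) = 9 - p by ring]

-- free strictly-decreasing completions: choose from the digits below prev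
theorem dpP_dec (s : List Char) : ∀ (p cs : Int), 0 ≤ p → p ≤ 9 →
    dpP s true true p 2 cs = combI p (s.length : Int) := by
  induction s with
  | nil => intro p cs h0 h9; simp [dpP, goodFalse, combI]
  | cons c s' ih =>
    intro p cs h0 h9
    rw [dpP]
    norm_num
    have hbody : ∀ d ∈ PySem.List.pyRange 0 10 1,
        dpP s' true true d (if p ≤ d then 3 else 2) (cs + d)
          = (fun d => if p ≤ d then (0:Int) else combI d (s'.length : Int)) d := by
      intro d hd
      rw [PySem.List.mem_pyRange_one] at hd
      by_cases hdp : p ≤ d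
      · simp [hdp, dpP_mt3]
      · simp only [hdp, if_false]
        exact ih d (cs + d) (by omega) (by omega)
    rw [List.map_congr_left hbody, splitSum2 _ p h0 10 (by norm_num)]
    rw [show min (10 : Int) p = p by omega]
    rw [sumChooseLow s'.length p.toNat p (by omega) (by omega)]

-- free completions of a fresh start: inc + dec, nothing if no second digit
theorem dpP_mt0 (s : List Char) : ∀ (p cs : Int), 0 ≤ p → p ≤ 9 →
    dpP s true true p 0 cs =
      if s.isEmpty then 0 else combI (9 - p) (s.length : Int) + combI p (s.length : Int) := by
  cases s with
  | nil => intro p cs h0 h9; simp [dpP, goodFalse]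
  | cons c s' =>
    intro p cs h0 h9
    rw [dpP]
    norm_num
    have hbody : ∀ d ∈ PySem.List.pyRange 0 10 1,
        dpP s' true true d (if p < d then 1 else if d < p then 2 else 3) (cs + d)
          = (fun d => if p < d then combI (9 - d) (s'.length : Int)
              else if d < p then combI d (s'.length : Int) else (0:Int)) d := by
      intro d hd
      rw [PySem.List.mem_pyRange_one] at hd
      rcases lt_trichotomy p d with hc | hc | hc
      · simp only [if_pos hc]
        exact dpP_inc s' d (cs + d) (by omega) (by omega)
      · subst hc
        simp [dpP_mt3]
      · simp only [if_neg (show ¬ p < d by omega), if_pos hc]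
        exact dpP_dec s' d (cs + d) (by omega) (by omega)
    rw [List.map_congr_left hbody, splitSum0 _ _ p h0 10 (by norm_num)]
    rw [show min (10 : Int) p = p by omega]
    rw [sumChooseHigh s'.length (9 - p.toNat) (p + 1) (by omega) (by omega)]
    rw [sumChooseLow s'.length p.toNat p (by omega) (by omega)]
    rw [show (10 : Int) - (p + 1) = 9 - p by ring]

-- free not-yet-started states: all fancy numbers with at most s.length digits
theorem dpP_free (s : List Char) : ∀ (prev mt cs : Int),
    dpP s true false prev mt cs =
      ((PySem.List.pyRange 2 ((s.length : Int) + 1) 1).map (fun k => combI 9 k + combI 10 k)).sum := by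
  induction s with
  | nil =>
    intro prev mt cs
    simp [dpP, goodFalse, PySem.List.pyRange_one_eq_nil (by omega : (1:Int) ≤ 2)]
  | cons c s' ih =>
    intro prev mt cs
    rw [dpP]
    norm_num
    have hbody : ∀ d ∈ PySem.List.pyRange 0 10 1,
        (if d = 0 then dpP s' true false (-1) 0 0 else dpP s' true true d 0 d)
          = (fun d => if d = 0 then
                ((PySem.List.pyRange 2 ((s'.length : Int) + 1) 1).map
                  (fun k => combI 9 k + combI 10 k)).sum
              else if s'.isEmpty then (0:Int)
              else combI (9 - d) (s'.length : Int) + combI d (s'.length : Int)) d := by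
      intro d hd
      rw [PySem.List.mem_pyRange_one] at hd
      by_cases hd0 : d = 0
      · simp [hd0, ih]
      · simp only [hd0, if_false]
        rw [dpP_mt0 s' d d (by omega) (by omega)]
    rw [List.map_congr_left hbody]
    rw [PySem.List.pyRange_one_cons (by omega : (0:Int) < 10)]
    norm_num
    have hne : ∀ d ∈ PySem.List.pyRange 1 10 1,
        (if d = 0 then
            (List.map (combI 9) (PySem.List.pyRange 2 ((s'.length:Int) + 1))).sum +
              (List.map (combI 10) (PySem.List.pyRange 2 ((s'.length:Int) + 1))).sum
          else if s' = [] then 0 else combI (9 - d) (s'.length:Int) + combI d (s'.length:Int))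
          = (fun d => if s' = [] then (0:Int)
              else combI (9 - d) (s'.length:Int) + combI d (s'.length:Int)) d := by
      intro d hd
      rw [PySem.List.mem_pyRange_one] at hd
      rw [if_neg (by omega)]
    rw [List.map_congr_left hne]
    by_cases hE : s' = []
    · subst hE
      norm_num [PySem.List.pyRange_one_eq_nil (by omega : (1:Int) ≤ 2),
        PySem.List.pyRange_one_eq_nil (by omega : (2:Int) ≤ 2)]
    · have hL : 1 ≤ s'.length := List.length_pos_iff.mpr hE
      simp only [hE, if_false]
      rw [PySem.List.sum_map_add_int]
      rw [sumChooseHigh s'.length 9 1 (by omega) (by omega)]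
      have hfull := sumChooseLow s'.length 10 10 rfl (by omega)
      rw [PySem.List.pyRange_one_cons (by omega : (0:Int) < 10)] at hfull
      simp only [List.map_cons, List.sum_cons] at hfull
      have h0L : combI 0 (s'.length : Int) = 0 := by
        simp only [combI]
        rw [Nat.choose_eq_zero_of_lt (by omega)]
        simp
      rw [h0L, zero_add, show (0:Int) + 1 = 1 by ring] at hfull
      rw [hfull]
      rw [PySem.List.pyRange_one_succ_right (by omega : (2:Int) ≤ (s'.length : Int) + 1)]
      simp only [List.map_append, List.sum_append, List.map_cons, List.sum_cons, List.map_nil,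
        List.sum_nil]
      rw [show (10:Int) - 1 = 9 by ring]
      ring

-- the tight walk: bTight accumulates exactly the tight part of the dp
theorem bTight_eq (s : List Char) : ∀ (prev mt cs total : Int),
    (∀ c ∈ s, 0 ≤ chInt c ∧ chInt c ≤ 9) → 0 ≤ prev → prev ≤ 9 →
    (mt = 0 ∨ mt = 1 ∨ mt = 2) →
    bTight (s.map chInt) prev mt total = total + dpP s false true prev mt cs := by
  induction s with
  | nil =>
    intro prev mt cs total hdig h0 h9 hmt
    rcases hmt with rfl | rfl | rfl <;> norm_num [bTight, dpP, goodFalse]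
  | cons c s' ih =>
    intro prev mt cs total hdig h0 h9 hmt
    have hc : 0 ≤ chInt c ∧ chInt c ≤ 9 := hdig c (by simp)
    have hdig' : ∀ x ∈ s', 0 ≤ chInt x ∧ chInt x ≤ 9 := fun x hx => hdig x (by simp [hx])
    rcases hmt with rfl | rfl | rfl
    · rw [dpP]
      norm_num
      simp only [bTight]
      norm_num
      rw [PySem.List.pyRange_one_succ_right hc.1]
      simp only [List.map_append, List.sum_append, List.map_cons, List.sum_cons, List.map_nil,
        List.sum_nil]
      have hbody : ∀ d ∈ PySem.List.pyRange 0 (chInt c) 1,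
          dpP s' (decide (d < chInt c)) true d (if prev < d then 1 else if d < prev then 2 else 3)
              (cs + d)
            = (fun d => if prev < d then combI (9 - d) (s'.length : Int)
                else if d < prev then combI d (s'.length : Int) else (0:Int)) d := by
        intro d hd
        rw [PySem.List.mem_pyRange_one] at hd
        rw [show decide (d < chInt c) = true by simp only [decide_eq_true_eq]; omega]
        rcases lt_trichotomy prev d with hx | hx | hx
        · simp only [if_pos hx]
          exact dpP_inc s' d (cs + d) (by omega) (by omega)
        · subst hx
          simp [dpP_mt3]
        · simp only [if_neg (show ¬ prev < d by omega), if_pos hx]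
          exact dpP_dec s' d (cs + d) (by omega) (by omega)
      rw [List.map_congr_left hbody, splitSum0 _ _ prev h0 (chInt c) hc.1]
      rw [show decide (chInt c < chInt c) = false by simp]
      rcases lt_trichotomy prev (chInt c) with hx | hx | hx
      · rw [if_pos hx, if_neg (by omega : ¬ (1:Int) = 3)]
        rw [ih (chInt c) 1 (cs + chInt c) _ hdig' hc.1 hc.2 (by omega)]
        ring
      · rw [← hx]
        rw [if_neg (by omega : ¬ prev < prev), if_neg (by omega : ¬ prev < prev),
          if_pos rfl]
        rw [dpP_mt3]
        ring
      · rw [if_neg (by omega : ¬ prev < chInt c), if_pos hx,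
          if_neg (by omega : ¬ (2:Int) = 3)]
        rw [ih (chInt c) 2 (cs + chInt c) _ hdig' hc.1 hc.2 (by omega)]
        ring
    · rw [dpP]
      norm_num
      simp only [bTight]
      norm_num
      rw [PySem.List.pyRange_one_succ_right hc.1]
      simp only [List.map_append, List.sum_append, List.map_cons, List.sum_cons, List.map_nil,
        List.sum_nil]
      have hbody : ∀ d ∈ PySem.List.pyRange 0 (chInt c) 1,
          dpP s' (decide (d < chInt c)) true d (if d ≤ prev then 3 else 1) (cs + d)
            = (fun d => if d ≤ prev then (0:Int) else combI (9 - d) (s'.length : Int)) d := by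
        intro d hd
        rw [PySem.List.mem_pyRange_one] at hd
        rw [show decide (d < chInt c) = true by simp only [decide_eq_true_eq]; omega]
        by_cases hx : d ≤ prev
        · simp [hx, dpP_mt3]
        · simp only [hx, if_false]
          exact dpP_inc s' d (cs + d) (by omega) (by omega)
      rw [List.map_congr_left hbody, splitSum1 _ prev h0 (chInt c) hc.1]
      rw [show decide (chInt c < chInt c) = false by simp]
      by_cases hx : chInt c ≤ prev
      · rw [if_pos hx, if_pos hx, dpP_mt3]
        ring
      · rw [if_neg hx, if_neg hx]
        rw [ih (chInt c) 1 (cs + chInt c) _ hdig' hc.1 hc.2 (by omega)]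
        ring
    · rw [dpP]
      norm_num
      simp only [bTight]
      norm_num
      rw [PySem.List.pyRange_one_succ_right hc.1]
      simp only [List.map_append, List.sum_append, List.map_cons, List.sum_cons, List.map_nil,
        List.sum_nil]
      have hbody : ∀ d ∈ PySem.List.pyRange 0 (chInt c) 1,
          dpP s' (decide (d < chInt c)) true d (if prev ≤ d then 3 else 2) (cs + d)
            = (fun d => if prev ≤ d then (0:Int) else combI d (s'.length : Int)) d := by
        intro d hd
        rw [PySem.List.mem_pyRange_one] at hd
        rw [show decide (d < chInt c) = true by simp only [decide_eq_true_eq]; omega]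
        by_cases hx : prev ≤ d
        · simp [hx, dpP_mt3]
        · simp only [hx, if_false]
          exact dpP_dec s' d (cs + d) (by omega) (by omega)
      rw [List.map_congr_left hbody, splitSum2 _ prev h0 (chInt c) hc.1]
      rw [show decide (chInt c < chInt c) = false by simp]
      by_cases hx : prev ≤ chInt c
      · rw [if_pos hx, if_pos hx, dpP_mt3]
        ring
      · rw [if_neg hx, if_neg hx]
        rw [ih (chInt c) 2 (cs + chInt c) _ hdig' hc.1 hc.2 (by omega)]
        ring

-- str(N) for N ≥ 0: a digit string, leading digit nonzero unless N = 0
theorem toDigitsCore_spec : ∀ (fuel n : Nat) (ds : List Char), n < fuel →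
    ∃ d t, Nat.toDigitsCore 10 fuel n ds = Nat.digitChar d :: (t ++ ds) ∧ d ≤ 9 ∧
      (1 ≤ n → 1 ≤ d) ∧ ∀ c ∈ t, ∃ e, e ≤ 9 ∧ c = Nat.digitChar e := by
  intro fuel
  induction fuel with
  | zero => intro n ds h; omega
  | succ fuel ih =>
    intro n ds h
    by_cases h10 : n / 10 = 0
    · refine ⟨n % 10, [], ?_, by omega, fun h1 => by omega, by simp⟩
      simp [Nat.toDigitsCore, h10]
    · obtain ⟨d, t, heq, hd9, hd1, ht⟩ := ih (n / 10) (Nat.digitChar (n % 10) :: ds)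
        (by omega)
      refine ⟨d, t ++ [Nat.digitChar (n % 10)], ?_, hd9, fun _ => hd1 (by omega), ?_⟩
      · rw [show Nat.toDigitsCore 10 (fuel + 1) n ds =
            Nat.toDigitsCore 10 fuel (n / 10) (Nat.digitChar (n % 10) :: ds) by
          simp [Nat.toDigitsCore, h10], heq]
        simp
      · intro x hx
        rcases List.mem_append.mp hx with hx | hx
        · exact ht x hx
        · exact ⟨n % 10, by omega, by simpa using hx⟩

theorem chInt_digitChar (d : Nat) (hd : d ≤ 9) : chInt (Nat.digitChar d) = (d : Int) := by
  interval_cases d <;> decide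

-- top level: the pure dp on str(N) is countB N
theorem dpP_top (N : Int) (hN : 0 ≤ N) :
    dpP (PySem.Int.toStr N).toList false false (-1) 0 0 = countB N := by
  obtain ⟨d0, t, heq, hd9, hd1, ht⟩ :=
    toDigitsCore_spec (N.toNat + 1) N.toNat [] (by omega)
  have hs2 : (PySem.Int.toStr N).toList = Nat.digitChar d0 :: t := by
    rw [PySem.Int.toList_toStr, PySem.Int.toChars, if_neg (by omega : ¬ N < 0),
      Nat.toDigits]
    simpa using heq
  have hdigt : ∀ c ∈ t, 0 ≤ chInt c ∧ chInt c ≤ 9 := by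
    intro c hcm
    obtain ⟨e, he9, rfl⟩ := ht c hcm
    rw [chInt_digitChar e he9]
    omega
  by_cases hN0 : N.toNat = 0
  · have : N = 0 := by omega
    subst this
    set_option maxRecDepth 8192 in decide
  · have hd0 : 1 ≤ d0 := hd1 (by omega)
    rw [hs2, dpP]
    norm_num
    rw [chInt_digitChar d0 hd9]
    unfold countB
    rw [hs2]
    rw [List.map_cons, chInt_digitChar d0 hd9]
    simp only [List.length_cons, List.headI_cons, List.tail_cons, List.length_map]
    by_cases hT : t = []
    · subst hT
      have hz : ∀ d ∈ PySem.List.pyRange 0 ((d0 : Int) + 1) 1,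
          (if d = 0 then dpP [] (decide (d < (d0 : Int))) false (-1) 0 0
            else dpP [] (decide (d < (d0 : Int))) true d 0 d) = (fun _ => (0:Int)) d := by
        intro d _
        by_cases hd : d = 0 <;> simp [hd, dpP, goodFalse]
      rw [List.map_congr_left hz]
      norm_num [PySem.List.pyRange_one_eq_nil (show ((1:Int)) ≤ 2 by omega)]
    · have hTlen : 1 ≤ t.length := List.length_pos_iff.mpr hT
      rw [if_pos (by push_cast; omega)]
      rw [PySem.List.pyRange_one_cons (by omega : (0:Int) < (d0 : Int) + 1)]
      rw [show ((0:Int) + 1) = 1 by norm_num]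
      rw [PySem.List.pyRange_one_succ_right (by omega : (1:Int) ≤ (d0 : Int))]
      simp only [List.map_cons, List.sum_cons, List.map_append, List.sum_append, List.map_nil,
        List.sum_nil]
      rw [if_pos trivial]
      rw [show decide ((0:Int) < (d0 : Int)) = true by
        simp only [decide_eq_true_eq]; omega]
      rw [dpP_free t (-1) 0 0]
      have hmid : ∀ d ∈ PySem.List.pyRange 1 (d0 : Int) 1,
          (if d = 0 then dpP t (decide (d < (d0 : Int))) false (-1) 0 0
            else dpP t (decide (d < (d0 : Int))) true d 0 d)
          = (fun d => combI (9 - d) (t.length : Int) + combI d (t.length : Int)) d := by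
        intro d hd
        rw [PySem.List.mem_pyRange_one] at hd
        rw [if_neg (by omega), show decide (d < (d0 : Int)) = true by
          simp only [decide_eq_true_eq]; omega]
        rw [dpP_mt0 t d d (by omega) (by omega)]
        rw [if_neg (by simpa [List.isEmpty_iff] using hT)]
      rw [List.map_congr_left hmid]
      rw [if_neg (by omega : ¬ (d0 : Int) = 0),
        show decide ((d0 : Int) < (d0 : Int)) = false by simp]
      rw [bTight_eq t (d0 : Int) 0 (d0 : Int) _ hdigt (by omega) (by omega) (by omega)]
      push_cast
      ring_nf

-- ===== VERDICT (by name: the statement is the Claim_ definition above) =====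
theorem countFancy_spec : Claim_equal_countFancy := by
  intro l r _hdom hpre
  obtain ⟨hl, hr⟩ := hpre
  unfold Spec_countFancy countFancy countFancy_alt
  have h1 := dpP_top r hr
  have h2 := dpP_top (l - 1) (by omega : (0:Int) ≤ l - 1)
  simp only [solveA_eq_dpP] at *
  rw [h1, h2]
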